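-- pv_equiv track=rewrite | github.com/jaabberwocky/30daysofcode | Day 6 - Let's Review/day6.py | even_odd_print
-- ===== SOURCE A (Python) =====
-- def even_odd_print(str):
--     even_char = []
--     odd_char = []
--     for index, char in enumerate(str):
--         if index == 0 or index % 2 ==0:
--             even_char.append(char)
--         else:
--             odd_char.append(char)
--     return "".join(even_char) + " " + "".join(odd_char)
-- ===== SOURCE B (Python) =====
-- def even_odd_print(str):
--     return str[::2] + " " + str[1::2]
-- ===== Notes on version B (the rewrite author's own statement) =====
-- stated objective: idiomatic
-- what changed: Replaces the enumerate loop with its parity branch and two accumulator lists by two strided slices str[::2] and str[1::2] concatenated with a space.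
import Mathlib
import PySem

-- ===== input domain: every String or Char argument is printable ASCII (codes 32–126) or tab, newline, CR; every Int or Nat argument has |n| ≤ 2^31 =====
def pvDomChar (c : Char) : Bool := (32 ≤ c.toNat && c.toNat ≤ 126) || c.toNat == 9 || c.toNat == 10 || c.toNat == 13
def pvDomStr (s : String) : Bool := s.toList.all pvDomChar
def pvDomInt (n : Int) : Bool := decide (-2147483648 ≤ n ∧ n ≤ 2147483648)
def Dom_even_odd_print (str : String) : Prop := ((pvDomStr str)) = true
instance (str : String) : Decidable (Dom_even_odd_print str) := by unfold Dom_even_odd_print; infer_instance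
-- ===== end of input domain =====

-- B replaces A's enumerate loop (parity branch + two accumulator lists) by two strided
-- slices str[::2] and str[1::2], joined with a space (idiomatic; same cost).

-- ===== PORT A =====
-- A: enumerate loop appending each char to even_char or odd_char, then "".join both.
def even_odd_print (str : String) : String :=
  let acc :=
    (PySem.List.enumerate str.toList 0).foldl
      (fun (acc : List Char × List Char) (p : Int × Char) =>
        if p.1 == 0 || p.1 % 2 == 0 then (acc.1 ++ [p.2], acc.2)
        else (acc.1, acc.2 ++ [p.2]))
      ([], [])
  String.ofList (acc.1 ++ ' ' :: acc.2)

-- ===== PORT B =====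
-- B: str[::2] + " " + str[1::2] (step-2 slices; step ≠ 0 so slice? is always some).
def even_odd_print_alt (str : String) : String :=
  String.ofList ((PySem.List.slice? str.toList none none 2).getD []
    ++ ' ' :: (PySem.List.slice? str.toList (some 1) none 2).getD [])

-- ===== PRECONDITION & SPEC =====
def Spec_even_odd_print (str : String) (out : String) : Prop := out = even_odd_print_alt str
instance (str : String) (out : String) : Decidable (Spec_even_odd_print str out) := by unfold Spec_even_odd_print; infer_instance

-- ===== CLAIM (what is proved, stated in full; the proofs are below) =====
def Claim_equal_even_odd_print : Prop := ∀ (str : String), Dom_even_odd_print str → Spec_even_odd_print str (even_odd_print str)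

-- ===== LEMMAS AND PROOFS =====

-- characters at even / odd positions, by mutual structural recursion
mutual
def pvEvens {α : Type} : List α → List α
  | [] => []
  | a :: t => a :: pvOdds t
def pvOdds {α : Type} : List α → List α
  | [] => []
  | _ :: t => pvEvens t
end

-- A's loop, generalized over the starting index s ≥ 0 and the accumulators.
lemma pv_loopA {α : Type} : ∀ (xs : List α) (s : Int) (e o : List α), 0 ≤ s →
    (PySem.List.enumerate xs s).foldl
      (fun (acc : List α × List α) (p : Int × α) =>
        if p.1 == 0 || p.1 % 2 == 0 then (acc.1 ++ [p.2], acc.2)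
        else (acc.1, acc.2 ++ [p.2])) (e, o)
    = if s % 2 = 0 then (e ++ pvEvens xs, o ++ pvOdds xs)
      else (e ++ pvOdds xs, o ++ pvEvens xs) := by
  intro xs
  induction xs with
  | nil => intro s e o hs; simp only [PySem.List.enumerate_nil, List.foldl_nil, pvEvens, pvOdds]; split <;> simp
  | cons a t ih =>
    intro s e o hs
    rw [PySem.List.enumerate_cons, List.foldl_cons]
    by_cases h : s % 2 = 0
    · have hg : ((s == 0 || s % 2 == 0) : Bool) = true := by simp [h]
      simp only [hg]
      rw [if_pos trivial]
      rw [ih (s+1) (e ++ [a]) o (by omega)]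
      have h1 : ¬ (s + 1) % 2 = 0 := by omega
      simp [h1, pvEvens, pvOdds, h]
    · have hg : ((s == 0 || s % 2 == 0) : Bool) = false := by
        simp; omega
      simp only [hg, Bool.false_eq_true, if_false]
      rw [ih (s+1) e (o ++ [a]) (by omega)]
      have h1 : (s + 1) % 2 = 0 := by omega
      simp [h1, pvEvens, pvOdds, h]

-- the strided filterMap forms of the two slices
lemma pv_fm : ∀ {α : Type} (xs : List α),
    (List.filterMap (fun k : Nat => xs[2*k]?) (List.range ((xs.length+1)/2)) = pvEvens xs)
    ∧ (List.filterMap (fun k : Nat => xs[2*k+1]?) (List.range (xs.length/2)) = pvOdds xs) := by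
  intro α xs
  induction xs with
  | nil => simp [pvEvens, pvOdds]
  | cons a t ih =>
    constructor
    · have hc : ((a :: t).length + 1) / 2 = t.length / 2 + 1 := by
        simp [List.length_cons]; omega
      rw [hc, List.range_succ_eq_map, List.filterMap_cons, List.filterMap_map]
      simp only [Nat.mul_zero, List.getElem?_cons_zero]
      have : (fun k : Nat => (a :: t)[2*(k+1)]?) = (fun k : Nat => t[2*k+1]?) := by
        funext k
        have : 2 * (k + 1) = (2*k+1) + 1 := by omega
        rw [this, List.getElem?_cons_succ]
      simp only [Function.comp_def]
      rw [show (fun k : Nat => (a :: t)[2 * (k + 1)]?) = (fun k : Nat => t[2*k+1]?) from this]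
      rw [ih.2]
      simp [pvEvens]
    · have hc : (a :: t).length / 2 = (t.length + 1) / 2 := by
        simp [List.length_cons]
      rw [hc]
      have : (fun k : Nat => (a :: t)[2*k+1]?) = (fun k : Nat => t[2*k]?) := by
        funext k; rw [List.getElem?_cons_succ]
      rw [this, ih.1]
      simp [pvOdds]

lemma pv_slice_even {α : Type} (xs : List α) :
    (PySem.List.slice? xs none none 2).getD [] = pvEvens xs := by
  have h2 : (2 : Int) ≠ 0 := by norm_num
  simp only [PySem.List.slice?, PySem.List.sliceIndices, if_neg h2]
  norm_num
  have hidx : (fun k : Nat => xs[(2 * (k:Int)).toNat]?) = (fun k : Nat => xs[2*k]?) := by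
    funext k
    congr 1
  by_cases h : 0 < xs.length
  · rw [if_pos h]
    have hcnt : (((xs.length : Int) + 2 - 1) / 2).toNat = (xs.length + 1) / 2 := by omega
    rw [hcnt, hidx, (pv_fm xs).1]
  · rw [if_neg h]
    have h0 : xs = [] := List.eq_nil_of_length_eq_zero (by omega)
    subst h0; simp [pvEvens]

lemma pv_slice_odd {α : Type} (xs : List α) :
    (PySem.List.slice? xs (some 1) none 2).getD [] = pvOdds xs := by
  have h2 : (2 : Int) ≠ 0 := by norm_num
  simp only [PySem.List.slice?, PySem.List.sliceIndices, if_neg h2]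
  norm_num
  by_cases h : 1 < xs.length
  · rw [show min (1 : Int) (xs.length : Int) = 1 from by omega]
    have hcnt : (((xs.length : Int) - 1 + 2 - 1) / 2).toNat = xs.length / 2 := by omega
    have hidx : (fun k : Nat => xs[(1 + 2 * (k:Int)).toNat]?) = (fun k : Nat => xs[2*k+1]?) := by
      funext k; congr 1; omega
    rw [hcnt, hidx, if_pos h, (pv_fm xs).2]
  · rw [if_neg h]
    have h01 : xs.length ≤ 1 := by omega
    have hodds : pvOdds xs = [] := by
      cases xs with
      | nil => simp [pvOdds]
      | cons a t =>
        cases t with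
        | nil => simp [pvOdds, pvEvens]
        | cons b u => simp at h01
    rw [hodds]
    simp

-- ===== VERDICT (by name: the statement is the Claim_ definition above) =====
theorem even_odd_print_spec : Claim_equal_even_odd_print := by
  intro str _
  unfold Spec_even_odd_print even_odd_print even_odd_print_alt
  rw [pv_slice_even, pv_slice_odd]
  rw [pv_loopA str.toList 0 [] [] le_rfl]
  norm_num
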